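-- pv_equiv track=rewrite | github.com/syeongkim/EasyDigest_back | easydigest/apps/words/gpt.py | infer_overall_pos
-- ===== SOURCE A (Python) =====
-- def infer_overall_pos(tokens):
--     upos = [p for _, p in tokens]
--     if any(p == "VERB" for p in upos):
--         return "Verb"
--     if any(p == "ADJ" for p in upos):
--         return "Adjective"
--     if any(p == "ADV" for p in upos):
--         return "Adverb"
--     if any(p == "NOUN" for p in upos):
--         return "Noun"
--     return "Unknown"
-- ===== SOURCE B (Python) =====
-- _RANK = {"VERB": 0, "ADJ": 1, "ADV": 2, "NOUN": 3}
-- _LABELS = ["Verb", "Adjective", "Adverb", "Noun", "Unknown"]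
--
-- def infer_overall_pos(tokens):
--     best = 4
--     for _, p in tokens:
--         r = _RANK.get(p, 4)
--         if r < best:
--             best = r
--     return _LABELS[best]
-- ===== Notes on version B (the rewrite author's own statement) =====
-- stated objective: alternative
-- what changed: Replaces four ordered any() scans over a materialized tag list with a single minimum-rank tracking pass over the tokens using a priority map and a label table.
import Mathlib
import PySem

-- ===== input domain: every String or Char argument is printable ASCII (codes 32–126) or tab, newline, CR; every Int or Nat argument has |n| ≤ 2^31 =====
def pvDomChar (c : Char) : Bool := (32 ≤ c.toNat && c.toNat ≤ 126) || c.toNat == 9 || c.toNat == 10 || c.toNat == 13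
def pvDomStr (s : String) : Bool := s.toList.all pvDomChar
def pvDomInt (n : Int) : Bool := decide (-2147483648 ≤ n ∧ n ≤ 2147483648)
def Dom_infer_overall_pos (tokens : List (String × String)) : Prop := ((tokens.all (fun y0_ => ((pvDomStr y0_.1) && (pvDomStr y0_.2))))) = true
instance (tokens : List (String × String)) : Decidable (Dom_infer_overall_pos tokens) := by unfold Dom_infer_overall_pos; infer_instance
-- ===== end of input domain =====

-- B replaces A's four ordered any() scans over a materialized tag list with one
-- minimum-rank pass over the tokens (alternative decomposition, same cost).

-- ===== PORT A =====
def infer_overall_pos (tokens : List (String × String)) : String :=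
  let upos := tokens.map (fun t => t.2)
  if upos.any (fun p => p == "VERB") then "Verb"
  else if upos.any (fun p => p == "ADJ") then "Adjective"
  else if upos.any (fun p => p == "ADV") then "Adverb"
  else if upos.any (fun p => p == "NOUN") then "Noun"
  else "Unknown"

-- ===== PORT B =====
-- _RANK.get(p, 4)
def pvRank (p : String) : Nat :=
  if p == "VERB" then 0
  else if p == "ADJ" then 1
  else if p == "ADV" then 2
  else if p == "NOUN" then 3
  else 4

def pvLabels : List String := ["Verb", "Adjective", "Adverb", "Noun", "Unknown"]

def infer_overall_pos_alt (tokens : List (String × String)) : String :=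
  let best := tokens.foldl (fun best t =>
    let r := pvRank t.2
    if r < best then r else best) 4
  pvLabels.getD best "Unknown"

-- ===== PRECONDITION & SPEC =====
def Spec_infer_overall_pos (tokens : List (String × String)) (out : String) : Prop := out = infer_overall_pos_alt tokens
instance (tokens : List (String × String)) (out : String) : Decidable (Spec_infer_overall_pos tokens out) := by unfold Spec_infer_overall_pos; infer_instance

-- ===== CLAIM (what is proved, stated in full; the proofs are below) =====
def Claim_equal_infer_overall_pos : Prop := ∀ (tokens : List (String × String)), Dom_infer_overall_pos tokens → Spec_infer_overall_pos tokens (infer_overall_pos tokens)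

-- ===== LEMMAS AND PROOFS =====

-- recursive characterization of B's minimum
def pvBest : List (String × String) → Nat
  | [] => 4
  | t :: ts => min (pvRank t.2) (pvBest ts)

theorem pvRank_le (p : String) : pvRank p ≤ 4 := by
  unfold pvRank; split_ifs <;> omega

theorem pvBest_le (ts : List (String × String)) : pvBest ts ≤ 4 := by
  induction ts with
  | nil => simp [pvBest]
  | cons t ts ih => simp only [pvBest]; omega

theorem pvFoldl_eq (ts : List (String × String)) (b : Nat) (hb : b ≤ 4) :
    ts.foldl (fun best t => let r := pvRank t.2; if r < best then r else best) b
      = min b (pvBest ts) := by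
  induction ts generalizing b with
  | nil => simp [pvBest]; omega
  | cons t ts ih =>
    simp only [List.foldl, pvBest]
    have h4 := pvRank_le t.2
    by_cases h : pvRank t.2 < b
    · simp only [h, if_pos]
      rw [ih _ (le_trans (Nat.le_of_lt h) hb)]
      omega
    · simp only [h, if_false]
      rw [ih _ hb]
      omega

-- the five mutually-exclusive cases of pvRank, at the Bool level
theorem pvRank_cases (p : String) :
    ((p == "VERB") = true ∧ pvRank p = 0) ∨
    ((p == "VERB") = false ∧ (p == "ADJ") = true ∧ pvRank p = 1) ∨
    ((p == "VERB") = false ∧ (p == "ADJ") = false ∧ (p == "ADV") = true ∧ pvRank p = 2) ∨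
    ((p == "VERB") = false ∧ (p == "ADJ") = false ∧ (p == "ADV") = false ∧
       (p == "NOUN") = true ∧ pvRank p = 3) ∨
    ((p == "VERB") = false ∧ (p == "ADJ") = false ∧ (p == "ADV") = false ∧
       (p == "NOUN") = false ∧ pvRank p = 4) := by
  unfold pvRank
  rcases h0 : (p == "VERB") with _ | _ <;>
  rcases h1 : (p == "ADJ") with _ | _ <;>
  rcases h2 : (p == "ADV") with _ | _ <;>
  rcases h3 : (p == "NOUN") with _ | _ <;>
    simp_all

-- pvBest equals the rank A's ordered scans select
theorem pvBest_char (ts : List (String × String)) :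
    pvBest ts =
      (if (ts.map (fun t => t.2)).any (fun p => p == "VERB") then 0
       else if (ts.map (fun t => t.2)).any (fun p => p == "ADJ") then 1
       else if (ts.map (fun t => t.2)).any (fun p => p == "ADV") then 2
       else if (ts.map (fun t => t.2)).any (fun p => p == "NOUN") then 3
       else 4) := by
  induction ts with
  | nil => simp [pvBest]
  | cons t ts ih =>
    have hle := pvBest_le ts
    simp only [pvBest, List.map_cons, List.any_cons, ih]
    rcases pvRank_cases t.2 with ⟨e0, hr⟩ | ⟨e0, e1, hr⟩ | ⟨e0, e1, e2, hr⟩ |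
      ⟨e0, e1, e2, e3, hr⟩ | ⟨e0, e1, e2, e3, hr⟩ <;>
      simp only [*, Bool.true_or, Bool.false_or, if_true] <;>
      split_ifs <;> omega

-- ===== VERDICT (by name: the statement is the Claim_ definition above) =====
theorem infer_overall_pos_spec : Claim_equal_infer_overall_pos := by
  intro tokens _
  unfold Spec_infer_overall_pos infer_overall_pos infer_overall_pos_alt
  rw [pvFoldl_eq tokens 4 (le_refl 4)]
  rw [Nat.min_eq_right (pvBest_le tokens), pvBest_char tokens]
  simp only []
  split_ifs <;> rfl
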